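-- pv_equiv track=rewrite | github.com/Sebislaw/Algebra_w_analizie_danych | Projekt 2/kod/kodowankoWiadomosci.py | zakodujWektor
-- ===== SOURCE A (Python) =====
-- def transponujMacierz(m):  # transponuje macierz
--     nowaMacierz = []
--     y = len(m)
--     x = len(m[0])
--     for i in range(x):
--         nowyWiersz = []
--         for d in range(y):
--             nowyWiersz.append(m[d][i])
--         nowaMacierz.append(nowyWiersz)
--     return nowaMacierz
--
-- def zakodujWektor(wektor, macierz):  # koduje wektor
--     zakodowany = []
--     macierzTransponowana = transponujMacierz(macierz)
--     for i in range(len(macierz[0])):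
--         suma = 0
--         for d in range(len(wektor)):
--             suma += wektor[d] * macierzTransponowana[i][d]
--         suma = suma % 5
--         zakodowany.append(suma)
--     return zakodowany
-- ===== SOURCE B (Python) =====
-- def zakodujWektor(wektor, macierz):  # koduje wektor
--     n = len(macierz[0])
--     zakodowany = [0] * n
--     for d in range(len(wektor)):
--         w = wektor[d]
--         row = macierz[d]
--         zakodowany = [zakodowany[i] + w * row[i] for i in range(n)]
--     return [s % 5 for s in zakodowany]
-- ===== Notes on version B (the rewrite author's own statement) =====
-- stated objective: simpler
-- what changed: Drops the transpose helper entirely: B accumulates a running result vector row by row (row-major saxpy updates) and takes mod 5 once at the end, instead of A's build-the-transpose-then-column-dot-products.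
-- outside the precondition, e.g. on zakodujWektor([74, 5, -2, 4], [[], [2, 2], []]): A returns [], B raises IndexError
import Mathlib
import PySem

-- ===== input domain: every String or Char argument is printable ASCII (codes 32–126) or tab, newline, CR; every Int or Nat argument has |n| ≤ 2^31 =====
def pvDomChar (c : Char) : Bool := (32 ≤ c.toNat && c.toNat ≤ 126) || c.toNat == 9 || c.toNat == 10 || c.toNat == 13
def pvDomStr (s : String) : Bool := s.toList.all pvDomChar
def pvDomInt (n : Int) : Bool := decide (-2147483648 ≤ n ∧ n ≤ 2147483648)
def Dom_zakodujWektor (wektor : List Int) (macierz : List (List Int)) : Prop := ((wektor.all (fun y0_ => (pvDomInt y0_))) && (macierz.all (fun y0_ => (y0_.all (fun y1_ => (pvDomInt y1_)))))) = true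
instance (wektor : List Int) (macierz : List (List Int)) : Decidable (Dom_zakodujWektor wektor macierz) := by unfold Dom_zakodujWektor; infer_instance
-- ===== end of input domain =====

-- B drops A's transpose helper: it accumulates a running result vector row by row and
-- takes mod 5 once at the end (simpler, O(n) extra space instead of the O(n*m) transpose).

-- ===== PORT A =====
def transponujMacierz (m : List (List Int)) : List (List Int) :=
  let y : Nat := m.length
  let x : Nat := (PySem.List.pyGetD m 0 []).length
  (PySem.List.pyRange 0 (x : Int) 1).foldl (fun nowaMacierz i =>
    nowaMacierz ++ [(PySem.List.pyRange 0 (y : Int) 1).foldl (fun nowyWiersz d =>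
      nowyWiersz ++ [PySem.List.pyGetD (PySem.List.pyGetD m d []) i 0]) []]) []

def zakodujWektor (wektor : List Int) (macierz : List (List Int)) : List Int :=
  let macierzTransponowana := transponujMacierz macierz
  (PySem.List.pyRange 0 ((PySem.List.pyGetD macierz 0 []).length : Int) 1).foldl
    (fun zakodowany i =>
      let suma := (PySem.List.pyRange 0 (wektor.length : Int) 1).foldl
        (fun suma d =>
          suma + PySem.List.pyGetD wektor d 0 *
            PySem.List.pyGetD (PySem.List.pyGetD macierzTransponowana i []) d 0) 0
      zakodowany ++ [PySem.Int.mod suma 5]) []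

-- ===== PORT B =====
def zakodujWektor_alt (wektor : List Int) (macierz : List (List Int)) : List Int :=
  let n : Nat := (PySem.List.pyGetD macierz 0 []).length
  let zakodowany : List Int := List.replicate n 0
  let zakodowany := (PySem.List.pyRange 0 (wektor.length : Int) 1).foldl
    (fun zakodowany d =>
      let w := PySem.List.pyGetD wektor d 0
      let row := PySem.List.pyGetD macierz d []
      (PySem.List.pyRange 0 (n : Int) 1).map
        (fun i => PySem.List.pyGetD zakodowany i 0 + w * PySem.List.pyGetD row i 0)) zakodowany
  zakodowany.map (fun s => PySem.Int.mod s 5)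

-- ===== PRECONDITION & SPEC =====
-- Pre_: a nonempty matrix, a vector no longer than the matrix (the dot products read
-- mt[i][d] for d < len(wektor)), and every row at least as long as the first (otherwise
-- the transpose raises IndexError). Pre_ also excludes overlong vectors paired with an
-- empty first row, where A returns [] without ever indexing the vector while B raises.
def Pre_zakodujWektor (wektor : List Int) (macierz : List (List Int)) : Prop :=
  macierz ≠ [] ∧ wektor.length ≤ macierz.length ∧
    ∀ row ∈ macierz, (macierz.getD 0 []).length ≤ row.length
instance (wektor : List Int) (macierz : List (List Int)) : Decidable (Pre_zakodujWektor wektor macierz) := by unfold Pre_zakodujWektor; infer_instance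
def pvWitness_zakodujWektor : List Int × List (List Int) := ([1, 2], [[1, 2], [3, 4]])

def Spec_zakodujWektor (wektor : List Int) (macierz : List (List Int)) (out : List Int) : Prop := out = zakodujWektor_alt wektor macierz
instance (wektor : List Int) (macierz : List (List Int)) (out : List Int) : Decidable (Spec_zakodujWektor wektor macierz out) := by unfold Spec_zakodujWektor; infer_instance

-- ===== CLAIM (what is proved, stated in full; the proofs are below) =====
def Claim_equal_zakodujWektor : Prop := ∀ (wektor : List Int) (macierz : List (List Int)), Dom_zakodujWektor wektor macierz → Pre_zakodujWektor wektor macierz → Spec_zakodujWektor wektor macierz (zakodujWektor wektor macierz)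

-- ===== LEMMAS AND PROOFS =====

-- dot product of wektor's first k entries with column i of macierz
def pvDot (wektor : List Int) (macierz : List (List Int)) (k : Nat) (i : Int) : Int :=
  (PySem.List.pyRange 0 (k : Int) 1).foldl
    (fun s d => s + PySem.List.pyGetD wektor d 0 *
      PySem.List.pyGetD (PySem.List.pyGetD macierz d []) i 0) 0

theorem pvDot_succ (wektor : List Int) (macierz : List (List Int)) (k : Nat) (i : Int) :
    pvDot wektor macierz (k + 1) i =
      pvDot wektor macierz k i + PySem.List.pyGetD wektor (k : Int) 0 *
        PySem.List.pyGetD (PySem.List.pyGetD macierz (k : Int) []) i 0 := by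
  unfold pvDot
  rw [show ((k + 1 : Nat) : Int) = (k : Int) + 1 by push_cast; ring,
    PySem.List.pyRange_one_succ_right (by positivity), List.foldl_append]
  simp

theorem zakodujWektor_eq (wektor : List Int) (macierz : List (List Int))
    (hlen : wektor.length ≤ macierz.length) :
    zakodujWektor wektor macierz =
      (PySem.List.pyRange 0 ((PySem.List.pyGetD macierz 0 []).length : Int) 1).map
        (fun i => PySem.Int.mod (pvDot wektor macierz wektor.length i) 5) := by
  unfold zakodujWektor transponujMacierz
  simp only [PySem.List.foldl_append_singleton_eq_map, List.nil_append]
  refine List.map_congr_left (fun i hi => ?_)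
  rw [PySem.List.mem_pyRange_one] at hi
  congr 1
  apply PySem.List.foldl_congr_mem
  intro s d hd
  rw [PySem.List.mem_pyRange_one] at hd
  rw [PySem.List.pyGetD_map_pyRange_of_nonneg _ _ _ _ hi.1 hi.2,
    PySem.List.pyGetD_map_pyRange_of_nonneg _ _ _ _ hd.1 (by exact_mod_cast lt_of_lt_of_le hd.2 (by exact_mod_cast hlen))]

theorem alt_loop (wektor : List Int) (macierz : List (List Int)) (k : Nat)
    (hk : k ≤ wektor.length) :
    (PySem.List.pyRange 0 (k : Int) 1).foldl
      (fun zak d =>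
        (PySem.List.pyRange 0 ((PySem.List.pyGetD macierz 0 []).length : Int) 1).map
          (fun i => PySem.List.pyGetD zak i 0 + PySem.List.pyGetD wektor d 0 *
            PySem.List.pyGetD (PySem.List.pyGetD macierz d []) i 0))
      (List.replicate (PySem.List.pyGetD macierz 0 []).length 0) =
    (PySem.List.pyRange 0 ((PySem.List.pyGetD macierz 0 []).length : Int) 1).map
      (fun i => pvDot wektor macierz k i) := by
  induction k with
  | zero =>
      simp only [Nat.cast_zero, PySem.List.pyRange_one_eq_nil le_rfl, List.foldl_nil]
      refine (List.eq_replicate_iff.mpr ⟨by simp [PySem.List.length_pyRange_one], ?_⟩).symm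
      intro b hb
      simp only [List.mem_map] at hb
      obtain ⟨i, _, rfl⟩ := hb
      simp [pvDot, PySem.List.pyRange_one_eq_nil le_rfl]
  | succ k ih =>
      rw [show ((k + 1 : Nat) : Int) = (k : Int) + 1 by push_cast; ring,
        PySem.List.pyRange_one_succ_right (by positivity), List.foldl_append, List.foldl_cons,
        List.foldl_nil, ih (by omega)]
      refine List.map_congr_left (fun i hi => ?_)
      rw [PySem.List.mem_pyRange_one] at hi
      rw [PySem.List.pyGetD_map_pyRange_of_nonneg _ _ _ _ hi.1 hi.2, pvDot_succ]

theorem zakodujWektor_alt_eq (wektor : List Int) (macierz : List (List Int)) :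
    zakodujWektor_alt wektor macierz =
      (PySem.List.pyRange 0 ((PySem.List.pyGetD macierz 0 []).length : Int) 1).map
        (fun i => PySem.Int.mod (pvDot wektor macierz wektor.length i) 5) := by
  unfold zakodujWektor_alt
  dsimp only []
  rw [alt_loop wektor macierz wektor.length le_rfl, List.map_map]
  rfl

theorem zakodujWektor_agree (wektor : List Int) (macierz : List (List Int))
    (hlen : wektor.length ≤ macierz.length) :
    zakodujWektor wektor macierz = zakodujWektor_alt wektor macierz := by
  rw [zakodujWektor_eq wektor macierz hlen, zakodujWektor_alt_eq]

-- ===== VERDICT (by name: the statement is the Claim_ definition above) =====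
theorem zakodujWektor_spec : Claim_equal_zakodujWektor := by
  intro wektor macierz _ hpre
  exact zakodujWektor_agree wektor macierz hpre.2.1
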